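-- pv_equiv track=rewrite | github.com/open-c3/open-c3-jumpserver | utils/common.py | treename_zip
-- ===== SOURCE A (Python) =====
-- def treename_zip(paths):
--     paths = set(paths)  # 保证唯一
--     to_remove = set()
--     for path in paths:
--         parts = path.split('.')
--         # 检查所有可能的前缀（不包含自己）
--         for i in range(1, len(parts)):
--             prefix = '.'.join(parts[:i])
--             if prefix in paths:
--                 to_remove.add(prefix)
--     return paths - to_remove
-- ===== SOURCE B (Python) =====
-- def treename_zip(paths):
--     ps = set(paths)
--     return {p for p in ps if not any(q != p and q.startswith(p + '.') for q in ps)}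
-- ===== Notes on version B (the rewrite author's own statement) =====
-- stated objective: idiomatic
-- what changed: Instead of A's generation of every dot-prefix of every path (split into fields, join each strict initial run) collected into a to_remove set and subtracted, B keeps each path p iff no other path q starts with p + '.', a direct pairwise startswith scan in one set comprehension.
import Mathlib
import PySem

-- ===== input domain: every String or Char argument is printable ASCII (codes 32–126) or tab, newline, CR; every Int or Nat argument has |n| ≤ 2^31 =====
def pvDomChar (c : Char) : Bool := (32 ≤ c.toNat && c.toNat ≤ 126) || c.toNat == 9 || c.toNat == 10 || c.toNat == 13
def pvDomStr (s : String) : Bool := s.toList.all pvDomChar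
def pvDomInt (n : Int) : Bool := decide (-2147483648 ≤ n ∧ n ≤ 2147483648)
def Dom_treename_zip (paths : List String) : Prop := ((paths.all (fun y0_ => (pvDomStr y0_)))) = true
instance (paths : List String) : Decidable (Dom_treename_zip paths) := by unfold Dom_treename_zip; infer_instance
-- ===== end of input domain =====

-- B keeps a path iff no other path extends it past a dot (one pairwise startswith scan in a set
-- comprehension), instead of A's generation of every dot-prefix of every path plus set membership;
-- plainer code, but the pairwise scan is quadratic in the number of paths where A is near-linear.
-- Outputs are Python sets: equality of the ports is on PySem.Set's first-occurrence order.

-- ===== PORT A =====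
def treename_zip (paths : List String) : List String :=
  let ps : PySem.Set String := PySem.Set.ofList paths
  let toRemove : PySem.Set String :=
    ps.foldl (fun tr path =>
      let parts : List String := (PySem.Chars.splitOn path.toList ['.']).map String.ofList
      (PySem.List.pyRange 1 (parts.length : Int)).foldl (fun tr i =>
        let pre := PySem.Str.join "." (PySem.List.slice parts none (some i))
        if PySem.Set.contains ps pre then PySem.Set.add tr pre else tr) tr)
      PySem.Set.empty
  PySem.Set.diff ps toRemove

-- ===== PORT B =====
def treename_zip_alt (paths : List String) : List String :=
  let ps : PySem.Set String := PySem.Set.ofList paths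
  ps.filter (fun p => !(ps.any (fun q => (q != p) && PySem.Str.startswith q (p ++ "."))))

-- ===== PRECONDITION & SPEC =====
def Spec_treename_zip (paths : List String) (out : List String) : Prop := out = treename_zip_alt paths
instance (paths : List String) (out : List String) : Decidable (Spec_treename_zip paths out) := by unfold Spec_treename_zip; infer_instance

-- ===== CLAIM (what is proved, stated in full; the proofs are below) =====
def Claim_equal_treename_zip : Prop := ∀ (paths : List String), Dom_treename_zip paths → Spec_treename_zip paths (treename_zip paths)

-- ===== LEMMAS AND PROOFS =====

/-- Direct structural recursion computing Python's split on a single dot. -/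
def sp : List Char → List (List Char)
  | [] => [[]]
  | c :: rest => if c = '.' then [] :: sp rest else (sp rest).modifyHead (c :: ·)

theorem sp_ne_nil (l : List Char) : sp l ≠ [] := by
  cases l with
  | nil => simp [sp]
  | cons c rest =>
    simp only [sp]
    split
    · simp
    · cases h : sp rest with
      | nil => exact absurd h (sp_ne_nil rest)
      | cons hd tl => simp [List.modifyHead]

theorem go_spec : ∀ (fuel : Nat) (l : List Char) (cur : List Char) (acc : List (List Char)),
    l.length ≤ fuel →
    PySem.Chars.splitOn.go ['.'] fuel l cur acc
      = acc.reverse ++ (sp l).modifyHead (cur.reverse ++ ·) := by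
  intro fuel
  induction fuel with
  | zero =>
    intro l cur acc h
    have : l = [] := by cases l <;> simp_all
    subst this
    simp [PySem.Chars.splitOn.go, sp]
  | succ n ih =>
    intro l cur acc h
    cases l with
    | nil => simp [PySem.Chars.splitOn.go, sp]
    | cons c rest =>
      by_cases hc : c = '.'
      · subst hc
        have hstep : PySem.Chars.splitOn.go ['.'] (n+1) ('.' :: rest) cur acc
             = PySem.Chars.splitOn.go ['.'] n rest [] (cur.reverse :: acc) := by
          simp [PySem.Chars.splitOn.go, List.isPrefixOf]
        rw [hstep, ih rest [] (cur.reverse :: acc) (by simpa using h)]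
        cases hsp : sp rest with
        | nil => exact absurd hsp (sp_ne_nil rest)
        | cons hd tl => simp [sp, hsp, List.modifyHead]
      · have hstep : PySem.Chars.splitOn.go ['.'] (n+1) (c :: rest) cur acc
             = PySem.Chars.splitOn.go ['.'] n rest (c :: cur) acc := by
          have : (['.'].isPrefixOf (c :: rest)) = false := by
            simp [List.isPrefixOf]
            exact fun h => absurd h.symm hc
          simp [PySem.Chars.splitOn.go, this]
        rw [hstep, ih rest (c :: cur) acc (by simpa using h)]
        cases hsp : sp rest with
        | nil => exact absurd hsp (sp_ne_nil rest)
        | cons hd tl => simp [sp, hc, hsp, List.modifyHead]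

theorem splitOn_eq_sp (l : List Char) : PySem.Chars.splitOn l ['.'] = sp l := by
  have h := go_spec (l.length + 1) l [] [] (by omega)
  rw [PySem.Chars.splitOn] at *
  rw [h]
  cases hsp : sp l with
  | nil => exact absurd hsp (sp_ne_nil l)
  | cons hd tl => simp [List.modifyHead]

/-- Dot-join on the char level. -/
def jn (parts : List (List Char)) : List Char := PySem.Chars.join ['.'] parts

theorem jn_singleton (x : List Char) : jn [x] = x := by simp [jn, PySem.Chars.join, List.intercalate]

theorem jn_cons (x : List Char) (xs : List (List Char)) (h : xs ≠ []) :
    jn (x :: xs) = x ++ '.' :: jn xs := by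
  cases xs with
  | nil => exact absurd rfl h
  | cons y ys => simp [jn, PySem.Chars.join, List.intercalate]

theorem jn_sp (l : List Char) : jn (sp l) = l := by
  induction l with
  | nil => rw [sp, jn_singleton]
  | cons c rest ih =>
    by_cases hc : c = '.'
    · subst hc
      rw [sp, if_pos rfl, jn_cons [] (sp rest) (sp_ne_nil rest), ih]
      simp
    · rw [sp, if_neg hc]
      cases hsp : sp rest with
      | nil => exact absurd hsp (sp_ne_nil rest)
      | cons hd tl =>
        rw [hsp] at ih
        cases tl with
        | nil =>
          rw [jn_singleton] at ih
          rw [List.modifyHead, jn_singleton, ih]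
        | cons a b =>
          rw [List.modifyHead, jn_cons (c :: hd) (a :: b) (by simp)]
          rw [jn_cons hd (a :: b) (by simp)] at ih
          rw [List.cons_append, ih]

theorem sp_append (a b : List Char) : sp (a ++ '.' :: b) = sp a ++ sp b := by
  induction a with
  | nil => simp [sp]
  | cons c rest ih =>
    by_cases hc : c = '.'
    · subst hc; simp [sp, ih]
    · simp only [List.cons_append, sp, if_neg hc, ih]
      cases hsp : sp rest with
      | nil => exact absurd hsp (sp_ne_nil rest)
      | cons hd tl => simp [List.modifyHead]

theorem jn_append (A B : List (List Char)) (hA : A ≠ []) (hB : B ≠ []) :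
    jn (A ++ B) = jn A ++ '.' :: jn B := by
  induction A with
  | nil => exact absurd rfl hA
  | cons x xs ih =>
    cases xs with
    | nil =>
      rw [List.singleton_append, jn_cons x B hB, jn_singleton]
    | cons y ys =>
      rw [List.cons_append, jn_cons x ((y :: ys) ++ B) (by simp),
          jn_cons x (y :: ys) (by simp), ih (by simp)]
      simp

/-- The heart of the equivalence: p is a proper dot-prefix of q (a join of a strict
    initial run of q's fields) iff q starts with p followed by a dot. -/
theorem key_iff (p q : List Char) :
    (∃ n : ℕ, 1 ≤ n ∧ n < (sp q).length ∧ jn ((sp q).take n) = p) ↔ (p ++ ['.']) <+: q := by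
  constructor
  · rintro ⟨n, h1, h2, h3⟩
    have hq : q = jn ((sp q).take n ++ (sp q).drop n) := by rw [List.take_append_drop, jn_sp]
    have hA : (sp q).take n ≠ [] :=
      List.ne_nil_of_length_pos (by rw [List.length_take]; omega)
    have hB : (sp q).drop n ≠ [] :=
      List.ne_nil_of_length_pos (by rw [List.length_drop]; omega)
    rw [jn_append _ _ hA hB, h3] at hq
    exact ⟨jn ((sp q).drop n), by simpa using hq.symm⟩
  · rintro ⟨r, hr⟩
    have hq : q = p ++ '.' :: r := by simpa using hr.symm
    refine ⟨(sp p).length, ?_, ?_, ?_⟩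
    · have := sp_ne_nil p
      cases h : sp p with
      | nil => exact absurd h this
      | cons hd tl => simp
    · rw [hq, sp_append]
      have := sp_ne_nil r
      cases h : sp r with
      | nil => exact absurd h this
      | cons hd tl => simp
    · rw [hq, sp_append, List.take_left, jn_sp]

/-- Membership in the inner fold of port A: conditional adds over a list. -/
theorem mem_inner_fold {β : Type} (r : List β) (tr0 : PySem.Set String)
    (c : β → Bool) (f : β → String) (x : String) :
    x ∈ r.foldl (fun tr i => if c i then PySem.Set.add tr (f i) else tr) tr0
      ↔ x ∈ tr0 ∨ ∃ i ∈ r, c i ∧ f i = x := by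
  induction r generalizing tr0 with
  | nil => simp
  | cons hd tl ih =>
    simp only [List.foldl_cons, ih]
    by_cases hc : c hd
    · rw [if_pos hc, PySem.Set.mem_add]
      constructor
      · rintro (⟨h | h⟩ | h)
        · exact Or.inl h
        · exact Or.inr ⟨hd, by simp [hc, h.symm]⟩
        · obtain ⟨i, hi, hci, hfi⟩ := h; exact Or.inr ⟨i, by simp [hi], hci, hfi⟩
      · rintro (h | ⟨i, hi, hci, hfi⟩)
        · exact Or.inl (Or.inl h)
        · rcases List.mem_cons.mp hi with h | h
          · exact Or.inl (Or.inr (by rw [← hfi, h]))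
          · exact Or.inr ⟨i, h, hci, hfi⟩
    · rw [if_neg hc]
      constructor
      · rintro (h | ⟨i, hi, hci, hfi⟩)
        · exact Or.inl h
        · exact Or.inr ⟨i, by simp [hi], hci, hfi⟩
      · rintro (h | ⟨i, hi, hci, hfi⟩)
        · exact Or.inl h
        · rcases List.mem_cons.mp hi with h | h
          · rw [h] at hfi hci; exact absurd hci hc
          · exact Or.inr ⟨i, h, hci, hfi⟩

/-- Membership in the outer fold, given a membership law for the step. -/
theorem mem_outer_fold (l : List String) (tr0 : PySem.Set String)
    (g : String → PySem.Set String → PySem.Set String) (P : String → String → Prop)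
    (hg : ∀ q tr x, x ∈ g q tr ↔ x ∈ tr ∨ P q x) (x : String) :
    x ∈ l.foldl (fun tr q => g q tr) tr0 ↔ x ∈ tr0 ∨ ∃ q ∈ l, P q x := by
  induction l generalizing tr0 with
  | nil => simp
  | cons hd tl ih =>
    simp only [List.foldl_cons, ih, hg]
    constructor
    · rintro (⟨h | h⟩ | ⟨q, hq, hP⟩)
      · exact Or.inl h
      · exact Or.inr ⟨hd, by simp, h⟩
      · exact Or.inr ⟨q, by simp [hq], hP⟩
    · rintro (h | ⟨q, hq, hP⟩)
      · exact Or.inl (Or.inl h)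
      · rcases List.mem_cons.mp hq with h | h
        · exact Or.inl (Or.inr (h ▸ hP))
        · exact Or.inr ⟨q, h, hP⟩

theorem prefix_ne {p q : String} (h : (p.toList ++ ['.']) <+: q.toList) : q ≠ p := by
  intro he
  subst he
  have := h.length_le
  simp at this

/-- A's prefix value, rewritten to the char level, for an in-range index. -/
theorem pre_eq (q : String) (i : Int) (h1 : 1 ≤ i) :
    PySem.Str.join "." (PySem.List.slice ((PySem.Chars.splitOn q.toList ['.']).map String.ofList) none (some i))
      = String.ofList (jn ((sp q.toList).take i.toNat)) := by
  rw [PySem.List.slice_to _ (by omega)]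
  have : (((PySem.Chars.splitOn q.toList ['.']).map String.ofList).take i.toNat)
       = ((sp q.toList).take i.toNat).map String.ofList := by
    rw [splitOn_eq_sp, List.map_take]
  rw [this, PySem.Str.join]
  have h1 : (".").toList = ['.'] := rfl
  rw [h1, jn]
  exact congrArg String.ofList (congrArg (PySem.Chars.join ['.']) (by
    have h : (String.toList ∘ String.ofList) = (id : List Char → List Char) := funext (fun l => by simp)
    rw [List.map_map, h, List.map_id]))

theorem remove_iff (paths : List String) (p : String)
    (hp : p ∈ PySem.Set.ofList paths) :
    p ∈ (PySem.Set.ofList paths).foldl (fun tr path =>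
          (PySem.List.pyRange 1 ((((PySem.Chars.splitOn path.toList ['.']).map String.ofList).length : Int))).foldl
            (fun tr i =>
              let pre := PySem.Str.join "." (PySem.List.slice ((PySem.Chars.splitOn path.toList ['.']).map String.ofList) none (some i))
              if PySem.Set.contains (PySem.Set.ofList paths) pre then PySem.Set.add tr pre else tr) tr)
          PySem.Set.empty
      ↔ ∃ q ∈ PySem.Set.ofList paths, (p.toList ++ ['.']) <+: q.toList := by
  rw [mem_outer_fold _ _ _
      (fun q x => ∃ i ∈ PySem.List.pyRange 1 ((((PySem.Chars.splitOn q.toList ['.']).map String.ofList).length : Int)),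
        (PySem.Set.contains (PySem.Set.ofList paths)
          (PySem.Str.join "." (PySem.List.slice ((PySem.Chars.splitOn q.toList ['.']).map String.ofList) none (some i))) = true)
        ∧ PySem.Str.join "." (PySem.List.slice ((PySem.Chars.splitOn q.toList ['.']).map String.ofList) none (some i)) = x)
      (fun q tr x => mem_inner_fold _ tr _ _ x)]
  have hempty : p ∉ (PySem.Set.empty : PySem.Set String) := by simp [PySem.Set.empty]
  simp only [hempty, false_or]
  constructor
  · rintro ⟨q, hq, i, hi, _, hpre⟩
    rw [PySem.List.mem_pyRange_one] at hi
    obtain ⟨hi1, hi2⟩ := hi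
    rw [pre_eq q i hi1] at hpre
    refine ⟨q, hq, ?_⟩
    rw [← key_iff]
    refine ⟨i.toNat, by omega, ?_, ?_⟩
    · have hlen : ((PySem.Chars.splitOn q.toList ['.']).map String.ofList).length = (sp q.toList).length := by
        rw [splitOn_eq_sp, List.length_map]
      omega
    · have := congrArg String.toList hpre
      simpa using this
  · rintro ⟨q, hq, hpref⟩
    rw [← key_iff] at hpref
    obtain ⟨n, hn1, hn2, hjn⟩ := hpref
    have hlen : ((PySem.Chars.splitOn q.toList ['.']).map String.ofList).length = (sp q.toList).length := by
      rw [splitOn_eq_sp, List.length_map]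
    have hpre := pre_eq q (n : Int) (by exact_mod_cast hn1)
    rw [Int.toNat_natCast, hjn] at hpre
    have hofp : String.ofList p.toList = p := by simp
    refine ⟨q, hq, (n : Int), ?_, ?_, ?_⟩
    · rw [PySem.List.mem_pyRange_one]
      constructor
      · exact_mod_cast hn1
      · rw [hlen]; exact_mod_cast hn2
    · rw [hpre, hofp, PySem.Set.contains_iff]; exact hp
    · rw [hpre, hofp]

-- ===== VERDICT (by name: the statement is the Claim_ definition above) =====
theorem treename_zip_spec : Claim_equal_treename_zip := by
  intro paths _
  unfold Spec_treename_zip treename_zip treename_zip_alt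
  simp only [PySem.Set.diff]
  apply List.filter_congr
  intro p hp
  congr 1
  rw [Bool.eq_iff_iff, PySem.Set.contains_iff, List.any_eq_true]
  rw [remove_iff paths p hp]
  constructor
  · rintro ⟨q, hq, hpref⟩
    refine ⟨q, hq, ?_⟩
    rw [Bool.and_eq_true, bne_iff_ne]
    refine ⟨prefix_ne hpref, ?_⟩
    rw [PySem.Str.startswith, PySem.Chars.startswith_iff]
    simpa [String.toList_append] using hpref
  · rintro ⟨q, hq, hcond⟩
    rw [Bool.and_eq_true, bne_iff_ne] at hcond
    obtain ⟨_, hsw⟩ := hcond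
    rw [PySem.Str.startswith, PySem.Chars.startswith_iff] at hsw
    refine ⟨q, hq, ?_⟩
    simpa [String.toList_append] using hsw
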